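-- pv_equiv track=rewrite | github.com/Abdulrhman-max/ChatGenius | migrate_to_pg.py | replace_sql_placeholders
-- ===== SOURCE A (Python) =====
-- def replace_sql_placeholders(text):
--     """Replace ? with %s inside SQL query strings only."""
--     result = []
--     i = 0
--     while i < len(text):
--         # Check for triple-quoted strings
--         if text[i:i+3] in ('"""', "'''"):
--             quote = text[i:i+3]
--             end = text.find(quote, i+3)
--             if end == -1:
--                 result.append(text[i:])
--                 break
--             string_content = text[i+3:end]
--             # Check if this looks like SQL
--             sql_keywords = ['SELECT', 'INSERT', 'UPDATE', 'DELETE', 'CREATE', 'ALTER', 'DROP',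
--                           'WHERE', 'FROM', 'INTO', 'VALUES', 'SET ']
--             is_sql = any(kw in string_content.upper() for kw in sql_keywords)
--             if is_sql:
--                 string_content = string_content.replace('?', '%s')
--             result.append(quote + string_content + quote)
--             i = end + 3
--         # Check for single/double quoted strings
--         elif text[i] in ('"', "'"):
--             quote = text[i]
--             j = i + 1
--             while j < len(text):
--                 if text[j] == '\\':
--                     j += 2
--                     continue
--                 if text[j] == quote:
--                     break
--                 j += 1
--             string_content = text[i+1:j]
--             # Check if this looks like SQL
--             sql_keywords = ['SELECT', 'INSERT', 'UPDATE', 'DELETE', 'CREATE', 'ALTER', 'DROP',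
--                           'WHERE', 'FROM', 'INTO', 'VALUES', 'SET ', 'AND ', 'admin_id',
--                           'LIMIT', 'ORDER', 'GROUP', 'HAVING', 'JOIN', 'LEFT ', 'INNER ',
--                           'ON CONFLICT', 'RETURNING']
--             is_sql = any(kw in string_content.upper() for kw in sql_keywords)
--             if is_sql and '?' in string_content:
--                 string_content = string_content.replace('?', '%s')
--             result.append(quote + string_content + quote)
--             i = j + 1
--         else:
--             result.append(text[i])
--             i += 1
--     return ''.join(result)
-- ===== SOURCE B (Python) =====
-- _KW_CORE = 'SELECT,INSERT,UPDATE,DELETE,CREATE,ALTER,DROP,WHERE,FROM,INTO,VALUES,SET '.split(',')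
-- _KW_EXTRA = 'AND ,admin_id,LIMIT,ORDER,GROUP,HAVING,JOIN,LEFT ,INNER ,ON CONFLICT,RETURNING'.split(',')
--
--
-- def _is_sql(content, keywords):
--     u = content.upper()
--     return any(kw in u for kw in keywords)
--
--
-- def _consume_short(rest, q):
--     """Consume chars of `rest` up to q (a backslash escapes the next char);
--     return (content, text after the closing quote)."""
--     buf = []
--     while rest and rest[0] != q:
--         if rest[0] == '\\':
--             buf += rest[:2]
--             rest = rest[2:]
--         else:
--             buf.append(rest[0])
--             rest = rest[1:]
--     return ''.join(buf), rest[1:]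
--
--
-- def replace_sql_placeholders(text):
--     """Replace ? with %s inside SQL query strings only."""
--     pieces = []
--     rest = text
--     while rest:
--         c = rest[0]
--         if c not in ('"', "'"):
--             pieces.append(c)
--             rest = rest[1:]
--         elif rest.startswith(c * 3):
--             content, sep, rest = rest[3:].partition(c * 3)
--             if sep and _is_sql(content, _KW_CORE):
--                 content = content.replace('?', '%s')
--             pieces.append(c * 3 + content + sep)
--         else:
--             content, rest = _consume_short(rest[1:], c)
--             if '?' in content and _is_sql(content, _KW_CORE + _KW_EXTRA):
--                 content = content.replace('?', '%s')
--             pieces.append(c + content + c)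
--     return ''.join(pieces)
-- ===== Notes on version B (the rewrite author's own statement) =====
-- stated objective: alternative
-- what changed: A is one monolithic index-driven while loop over positions with slicing, str.find and a hand-rolled inner index scan; B consumes a shrinking suffix of the text instead: it has no indices at all, peels a triple-quoted string with str.partition, delegates short strings to a helper that eats the suffix character by character, and emits pieces per string literal.
import Mathlib
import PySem

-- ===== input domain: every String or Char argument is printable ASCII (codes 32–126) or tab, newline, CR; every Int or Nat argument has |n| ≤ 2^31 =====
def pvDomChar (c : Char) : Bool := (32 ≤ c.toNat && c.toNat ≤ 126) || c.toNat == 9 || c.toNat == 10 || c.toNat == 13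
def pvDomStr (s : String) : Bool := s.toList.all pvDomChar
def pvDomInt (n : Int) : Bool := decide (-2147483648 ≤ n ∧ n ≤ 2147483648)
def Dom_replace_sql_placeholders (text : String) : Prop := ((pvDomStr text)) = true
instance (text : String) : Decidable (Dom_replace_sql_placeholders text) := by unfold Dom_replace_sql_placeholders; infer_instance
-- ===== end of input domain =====

-- B replaces A's index-driven while loop (slicing, str.find, an inner index scan) by a
-- suffix-consuming decomposition with no indices: str.partition peels a triple-quoted
-- string, a character-eating helper peels a short string; same behaviour everywhere.

-- ===== PORT A =====
def pvKwA3 : List (List Char) :=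
  ["SELECT".toList, "INSERT".toList, "UPDATE".toList, "DELETE".toList, "CREATE".toList,
   "ALTER".toList, "DROP".toList, "WHERE".toList, "FROM".toList, "INTO".toList,
   "VALUES".toList, "SET ".toList]

def pvKwA1 : List (List Char) :=
  ["SELECT".toList, "INSERT".toList, "UPDATE".toList, "DELETE".toList, "CREATE".toList,
   "ALTER".toList, "DROP".toList, "WHERE".toList, "FROM".toList, "INTO".toList,
   "VALUES".toList, "SET ".toList, "AND ".toList, "admin_id".toList, "LIMIT".toList,
   "ORDER".toList, "GROUP".toList, "HAVING".toList, "JOIN".toList, "LEFT ".toList,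
   "INNER ".toList, "ON CONFLICT".toList, "RETURNING".toList]

-- A's inner `while j < len(text)` locating the closing single/double quote (j may pass the
-- end); the fuel argument (always called with s.length, enough since j advances every step)
-- only makes the recursion structural
def pvFindJ : List Char → Char → Nat → Nat → Nat
  | _, _, 0, j => j
  | s, q, fuel+1, j =>
    if h : j < s.length then
      if s[j] = '\\' then pvFindJ s q fuel (j+2)
      else if s[j] = q then j
      else pvFindJ s q fuel (j+1)
    else j

-- A's `while i < len(text)` main loop, with the `result` accumulator (fuel as above)
def pvLoopA : List Char → Nat → Nat → List (List Char) → List (List Char)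
  | _, 0, _, acc => acc
  | s, fuel+1, i, acc =>
    if hi : i < s.length then
    if h3 : PySem.List.slice s (some (i : Int)) (some ((i : Int)+3)) = "\"\"\"".toList ∨
            PySem.List.slice s (some (i : Int)) (some ((i : Int)+3)) = "'''".toList then
      let quote := PySem.List.slice s (some (i : Int)) (some ((i : Int)+3))
      let e := PySem.Chars.findFrom s quote ((i : Int)+3)
      if he : e = -1 then acc ++ [PySem.List.slice s (some (i : Int)) none]
      else
        let content := PySem.List.slice s (some ((i : Int)+3)) (some e)
        let content := if pvKwA3.any (fun kw => PySem.Chars.isIn kw (PySem.Chars.upper content))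
          then PySem.Chars.replace content "?".toList "%s".toList else content
        pvLoopA s fuel (e.toNat + 3) (acc ++ [quote ++ content ++ quote])
    else if s[i] = '"' ∨ s[i] = '\'' then
      let q := s[i]
      let j := pvFindJ s q s.length (i+1)
      let content := PySem.List.slice s (some ((i : Int)+1)) (some (j : Int))
      let content := if (pvKwA1.any (fun kw => PySem.Chars.isIn kw (PySem.Chars.upper content)))
          && PySem.Chars.isIn "?".toList content
        then PySem.Chars.replace content "?".toList "%s".toList else content
      pvLoopA s fuel (j+1) (acc ++ [[q] ++ content ++ [q]])
    else pvLoopA s fuel (i+1) (acc ++ [[s[i]]])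
  else acc

def replace_sql_placeholders (text : String) : String :=
  String.ofList (PySem.Chars.join [] (pvLoopA text.toList text.toList.length 0 []))  -- ''.join(result)

-- ===== PORT B =====
-- Source B's keyword strings, split on ','
def pvKwCore : List (List Char) :=
  PySem.Chars.splitOn "SELECT,INSERT,UPDATE,DELETE,CREATE,ALTER,DROP,WHERE,FROM,INTO,VALUES,SET ".toList ",".toList

def pvKwExtra : List (List Char) :=
  PySem.Chars.splitOn "AND ,admin_id,LIMIT,ORDER,GROUP,HAVING,JOIN,LEFT ,INNER ,ON CONFLICT,RETURNING".toList ",".toList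

def pvIsSql (content : List Char) (kws : List (List Char)) : Bool :=
  let u := PySem.Chars.upper content
  kws.any (fun kw => PySem.Chars.isIn kw u)

-- _consume_short's `while rest and rest[0] != q` loop, eating the suffix
def pvConsumeShort (q : Char) : List Char → List Char → List Char × List Char
  | bufEnd, [] => (bufEnd, [])
  | buf, c :: rest =>
    if c = q then (buf, rest)
    else if c = '\\' then pvConsumeShort q (buf ++ (c :: rest).take 2) ((c :: rest).drop 2)
    else pvConsumeShort q (buf ++ [c]) rest
termination_by _ l => l.length
decreasing_by all_goals (simp only [List.length_drop, List.length_cons]; omega)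

-- the suffix pvConsumeShort leaves is no longer than its input (cited by pvPeel's termination)
lemma pvConsumeShort_len (q : Char) : ∀ (buf l : List Char),
    (pvConsumeShort q buf l).2.length ≤ l.length
  | _, [] => by simp [pvConsumeShort]
  | buf, c :: rest => by
    simp only [pvConsumeShort]
    split
    · simp
    · split
      · have := pvConsumeShort_len q (buf ++ (c :: rest).take 2) ((c :: rest).drop 2)
        simp at this ⊢
        omega
      · have := pvConsumeShort_len q (buf ++ [c]) rest
        simp at this ⊢
        omega
termination_by _ l => l.length
decreasing_by all_goals (simp only [List.length_drop, List.length_cons]; omega)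

-- str.partition(sep): split at the FIRST occurrence of sep (ported by hand: scan for the
-- first position where sep is a prefix of the remaining suffix; exact for non-empty sep,
-- and Source B only passes the 3-character sep c*3)
def pvPartition (sep : List Char) : List Char → List Char × List Char × List Char
  | [] => ([], [], [])
  | c :: rest =>
    if sep.isPrefixOf (c :: rest) then ([], sep, (c :: rest).drop sep.length)
    else
      let r := pvPartition sep rest
      (c :: r.1, r.2)

-- the third component of pvPartition is no longer than the input (cited by pvPeel's termination)
lemma pvPartition_len (sep : List Char) : ∀ (l : List Char),
    (pvPartition sep l).2.2.length ≤ l.length := by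
  intro l
  induction l with
  | nil => simp [pvPartition]
  | cons c rest ih =>
    simp only [pvPartition]
    split
    · simp
    · simpa using le_trans ih (by omega)

-- B's `while rest` loop: peel one character, or one whole string literal, off the suffix
def pvPeel : List Char → List (List Char)
  | [] => []
  | c :: rest =>
    if c = '"' ∨ c = '\'' then
      if [c, c, c].isPrefixOf (c :: rest) then
        let p := pvPartition [c, c, c] (rest.drop 2)
        let content := if p.2.1 ≠ [] ∧ pvIsSql p.1 pvKwCore
          then PySem.Chars.replace p.1 "?".toList "%s".toList else p.1
        ([c, c, c] ++ content ++ p.2.1) :: pvPeel p.2.2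
      else
        let r := pvConsumeShort c [] rest
        let content := if PySem.Chars.isIn "?".toList r.1 ∧ pvIsSql r.1 (pvKwCore ++ pvKwExtra)
          then PySem.Chars.replace r.1 "?".toList "%s".toList else r.1
        ([c] ++ content ++ [c]) :: pvPeel r.2
    else [c] :: pvPeel rest
termination_by l => l.length
decreasing_by
  · have h1 := pvPartition_len [c, c, c] (rest.drop 2)
    simp at h1 ⊢
    omega
  · have h2 := pvConsumeShort_len c [] rest
    simp at h2 ⊢
    omega
  · simp

def replace_sql_placeholders_alt (text : String) : String :=
  String.ofList (PySem.Chars.join [] (pvPeel text.toList))  -- ''.join(pieces)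

-- ===== PRECONDITION & SPEC =====
def Spec_replace_sql_placeholders (text : String) (out : String) : Prop := out = replace_sql_placeholders_alt text
instance (text : String) (out : String) : Decidable (Spec_replace_sql_placeholders text out) := by unfold Spec_replace_sql_placeholders; infer_instance

-- ===== CLAIM (what is proved, stated in full; the proofs are below) =====
def Claim_equal_replace_sql_placeholders : Prop := ∀ (text : String), Dom_replace_sql_placeholders text → Spec_replace_sql_placeholders text (replace_sql_placeholders text)

-- ===== LEMMAS AND PROOFS =====

-- the clamped Nat-bounds slice text[a:b] that A's slice expressions reduce to
def sliceN (s : List Char) (a b : Nat) : List Char := (s.drop a).take (b - a)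

lemma pv_sliceC (s : List Char) (a b : Nat) :
    PySem.List.slice s (some (a : Int)) (some (b : Int)) = sliceN s a b := by
  rw [PySem.List.slice_natCast]; rfl

lemma pv_sliceC3 (s : List Char) (i : Nat) :
    PySem.List.slice s (some (i : Int)) (some ((i : Int)+3)) = sliceN s i (i+3) := by
  have h : ((i : Int) + 3) = ((i + 3 : Nat) : Int) := by push_cast; ring
  rw [h, pv_sliceC]

lemma pv_sliceC1j (s : List Char) (i j : Nat) :
    PySem.List.slice s (some ((i : Int)+1)) (some (j : Int)) = sliceN s (i+1) j := by
  have h1 : ((i : Int) + 1) = ((i + 1 : Nat) : Int) := by push_cast; ring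
  rw [h1, pv_sliceC]

lemma sliceN_nil (s : List Char) (a : Nat) : sliceN s a a = [] := by
  simp [sliceN]

lemma sliceN_add (s : List Char) (a m : Nat) : sliceN s a (a+m) = (s.drop a).take m := by
  simp [sliceN]

lemma sliceN_split (s : List Char) (a m b : Nat) (ham : a ≤ m) (hmb : m ≤ b) :
    sliceN s a b = sliceN s a m ++ sliceN s m b := by
  unfold sliceN
  have hb : b - a = (m - a) + (b - m) := by omega
  rw [hb, List.take_add, List.drop_drop, Nat.add_sub_cancel' ham]

lemma sliceN_cons (s : List Char) (i b : Nat) (hi : i < s.length) (hb : i < b) :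
    sliceN s i b = s[i] :: sliceN s (i+1) b := by
  unfold sliceN
  rw [List.drop_eq_getElem_cons hi]
  have hb' : b - i = (b - (i+1)) + 1 := by omega
  rw [hb', List.take_succ_cons]

-- A's inner while loop never moves left
lemma pvFindJ_ge (s : List Char) (q : Char) (fuel : Nat) : ∀ j, j ≤ pvFindJ s q fuel j := by
  induction fuel with
  | zero => intro j; simp [pvFindJ]
  | succ f ih =>
    intro j
    simp only [pvFindJ]
    split
    · split
      · exact le_trans (by omega) (ih (j+2))
      · split
        · exact le_rfl
        · exact le_trans (by omega) (ih (j+1))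
    · exact le_rfl

-- characterisation of A's inner while loop, one case equation each
lemma pvFindJ_stop (s : List Char) (q : Char) (fuel j : Nat) (h : ¬ j < s.length) :
    pvFindJ s q fuel j = j := by
  cases fuel with
  | zero => rfl
  | succ f => simp only [pvFindJ]; rw [dif_neg h]

lemma pvFindJ_bs (s : List Char) (q : Char) (f j : Nat) (h : j < s.length)
    (hb : s[j] = '\\') : pvFindJ s q (f+1) j = pvFindJ s q f (j+2) := by
  simp only [pvFindJ]
  rw [dif_pos h, if_pos hb]

lemma pvFindJ_close (s : List Char) (q : Char) (f j : Nat) (h : j < s.length)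
    (hb : ¬ s[j] = '\\') (hq : s[j] = q) : pvFindJ s q (f+1) j = j := by
  simp only [pvFindJ]
  rw [dif_pos h, if_neg hb, if_pos hq]

lemma pvFindJ_other (s : List Char) (q : Char) (f j : Nat) (h : j < s.length)
    (hb : ¬ s[j] = '\\') (hq : ¬ s[j] = q) : pvFindJ s q (f+1) j = pvFindJ s q f (j+1) := by
  simp only [pvFindJ]
  rw [dif_pos h, if_neg hb, if_neg hq]

-- B's short-string consumer computes exactly A's closing index j: it returns the slice
-- text[i:j] as content and the suffix after j
lemma pv_consume (s : List Char) (q : Char) (hq : ¬ q = '\\') : ∀ (fuel i : Nat) (buf : List Char),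
    s.length ≤ fuel + i →
    pvConsumeShort q buf (s.drop i) =
      (buf ++ sliceN s i (pvFindJ s q fuel i), s.drop (pvFindJ s q fuel i + 1)) := by
  intro fuel
  induction fuel with
  | zero =>
    intro i buf hf
    rw [List.drop_eq_nil_of_le (by omega)]
    simp [pvConsumeShort, pvFindJ, sliceN_nil, List.drop_eq_nil_of_le (by omega : s.length ≤ i + 1)]
  | succ f ih =>
    intro i buf hf
    by_cases h : i < s.length
    · rw [List.drop_eq_getElem_cons h]
      by_cases hcq : s[i] = q
      · have hnb : ¬ s[i] = '\\' := by rw [hcq]; exact hq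
        rw [pvFindJ_close s q f i h hnb hcq]
        simp only [pvConsumeShort]
        rw [if_pos hcq, sliceN_nil]
        simp
      · by_cases hb : s[i] = '\\'
        · rw [pvFindJ_bs s q f i h hb]
          simp only [pvConsumeShort]
          rw [if_neg hcq, if_pos hb]
          have hd2 : (s[i] :: s.drop (i+1)).drop 2 = s.drop (i+2) := by
            simp [List.drop_drop]
          have ht2 : (s[i] :: s.drop (i+1)).take 2 = sliceN s i (i+2) := by
            rw [sliceN_add, List.drop_eq_getElem_cons h]
          rw [hd2, ht2, ih (i+2) _ (by omega)]
          have hge := pvFindJ_ge s q f (i+2)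
          rw [List.append_assoc, ← sliceN_split s i (i+2) _ (by omega) hge]
        · rw [pvFindJ_other s q f i h hb hcq]
          simp only [pvConsumeShort]
          rw [if_neg hcq, if_neg hb, ih (i+1) _ (by omega)]
          have hge := pvFindJ_ge s q f (i+1)
          rw [List.append_assoc, List.singleton_append,
            ← sliceN_cons s i _ h (by omega)]
    · rw [List.drop_eq_nil_of_le (by omega), pvFindJ_stop s q (f+1) i h]
      simp [pvConsumeShort, sliceN_nil, List.drop_eq_nil_of_le (by omega : s.length ≤ i + 1)]

-- pvPartition splits at the first position where sep occurs (and returns (l, [], []) when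
-- sep does not occur at all)
lemma pv_partition_none (sep : List Char) : ∀ l : List Char,
    (∀ k, ¬ sep <+: l.drop k) → pvPartition sep l = (l, [], []) := by
  intro l
  induction l with
  | nil => intro _; rfl
  | cons c rest ih =>
    intro hno
    simp only [pvPartition]
    rw [if_neg (by
      rw [List.isPrefixOf_iff_prefix]
      exact hno 0)]
    rw [ih (fun k => by simpa using hno (k+1))]

lemma pv_partition_found (sep : List Char) (hne : sep ≠ []) : ∀ (l : List Char) (m : Nat),
    sep <+: l.drop m → (∀ k < m, ¬ sep <+: l.drop k) →
    pvPartition sep l = (l.take m, sep, l.drop (m + sep.length)) := by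
  intro l
  induction l with
  | nil =>
    intro m hp _
    simp at hp
    exact absurd hp hne
  | cons c rest ih =>
    intro m hp hmin
    cases m with
    | zero =>
      simp only [pvPartition]
      rw [if_pos (List.isPrefixOf_iff_prefix.mpr (by simpa using hp))]
      simp
    | succ m =>
      simp only [pvPartition]
      rw [if_neg (by
        rw [List.isPrefixOf_iff_prefix]
        simpa using hmin 0 (by omega))]
      rw [ih m (by simpa using hp) (fun k hk => by simpa using hmin (k+1) (by omega))]
      simp only [List.take_succ_cons]
      rw [show m + 1 + sep.length = (m + sep.length) + 1 from by omega, List.drop_succ_cons]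

-- reading off a 3-character take at a position
lemma pv_take3 (s : List Char) (i : Nat) (hi : i < s.length) (c : Char) :
    (s.drop i).take 3 = [c, c, c] ↔ s[i] = c ∧ (s.drop (i+1)).take 2 = [c, c] := by
  rw [List.drop_eq_getElem_cons hi, List.take_succ_cons]
  constructor
  · intro h
    injection h with h1 h2
    exact ⟨h1, h2⟩
  · rintro ⟨h1, h2⟩
    rw [h1, h2]

lemma pv_quote3 : ("\"\"\"".toList : List Char) = ['"', '"', '"'] := by decide

lemma pv_quote3' : ("'''".toList : List Char) = ['\'', '\'', '\''] := by decide

lemma pvLoopA_end (s : List Char) (fuel i : Nat) (acc : List (List Char))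
    (h : s.length ≤ i) : pvLoopA s fuel i acc = acc := by
  cases fuel with
  | zero => rfl
  | succ f => simp only [pvLoopA]; rw [dif_neg (by omega)]

lemma pv_kw3 : pvKwCore = pvKwA3 := by decide

lemma pv_kw1 : pvKwCore ++ pvKwExtra = pvKwA1 := by decide

-- the two main loops produce the same piece list: A's loop from index i produces acc ++
-- B's peeling of the suffix s.drop i
lemma pv_main (s : List Char) : ∀ (fuel i : Nat) (acc : List (List Char)),
    s.length ≤ fuel + i → pvLoopA s fuel i acc = acc ++ pvPeel (s.drop i) := by
  intro fuel
  induction fuel with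
  | zero =>
    intro i acc hf
    rw [List.drop_eq_nil_of_le (by omega)]
    simp [pvLoopA, pvPeel]
  | succ f ih =>
    intro i acc hf
    by_cases hi : i < s.length
    · have hdrop : s.drop i = s[i] :: s.drop (i+1) := List.drop_eq_getElem_cons hi
      by_cases hc : s[i] = '"' ∨ s[i] = '\''
      · by_cases ht : (s.drop i).take 3 = [s[i], s[i], s[i]]
        · -- a triple-quoted string starts here
          have hlen3 : i + 3 ≤ s.length := by
            have := congrArg List.length ht
            simp at this
            omega
          have hsl : PySem.List.slice s (some (i : Int)) (some ((i : Int)+3)) =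
              [s[i], s[i], s[i]] := by
            rw [pv_sliceC3, sliceN_add]
            exact ht
          have h3 : PySem.List.slice s (some (i : Int)) (some ((i : Int)+3)) = "\"\"\"".toList ∨
                    PySem.List.slice s (some (i : Int)) (some ((i : Int)+3)) = "'''".toList := by
            rcases hc with hq | hq
            · left; rw [hsl, hq]; rfl
            · right; rw [hsl, hq]; rfl
          have hpre : [s[i], s[i], s[i]].isPrefixOf (s[i] :: s.drop (i+1)) = true := by
            rw [List.isPrefixOf_iff_prefix, List.prefix_iff_eq_take]
            rw [← hdrop]
            simpa using ht.symm
          have hd2 : (s.drop (i+1)).drop 2 = s.drop (i+3) := by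
            rw [List.drop_drop]
          conv_lhs => simp only [pvLoopA]
          rw [dif_pos hi, dif_pos h3]
          rw [hsl, show ((i : Int)+3) = ((i+3 : Nat) : Int) from by push_cast; ring,
            PySem.Chars.findFrom_natCast s _ (i+3) hlen3]
          rw [hdrop]
          conv_rhs => simp only [pvPeel]
          rw [if_pos hc, if_pos hpre, hd2]
          by_cases hF : PySem.Chars.find (s.drop (i+3)) [s[i], s[i], s[i]] = -1
          · -- unterminated: A appends text[i:], B's partition finds no separator
            have hno : ∀ k, ¬ [s[i], s[i], s[i]] <+: (s.drop (i+3)).drop k := by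
              intro k hp
              have : ([s[i], s[i], s[i]] : List Char) <:+: s.drop (i+3) :=
                hp.isInfix.trans (List.drop_suffix k _).isInfix
              exact (PySem.Chars.find_eq_neg_one_iff _ _).1 hF this
            rw [pv_partition_none [s[i], s[i], s[i]] (s.drop (i+3)) hno]
            rw [hF, if_pos rfl, dif_pos rfl]
            simp only []
            rw [if_neg (fun h => h.1 rfl)]
            simp only [pvPeel]
            rw [PySem.List.slice_from_natCast]
            have hrest : s.drop i = [s[i], s[i], s[i]] ++ s.drop (i+3) := by
              conv_lhs => rw [← List.take_append_drop 3 (s.drop i)]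
              rw [List.drop_drop, ht]
            rw [hrest]
            simp
          · -- terminated: A's find lands on the first occurrence, B's partition splits there
            have hF0 : 0 ≤ PySem.Chars.find (s.drop (i+3)) [s[i], s[i], s[i]] := by
              have := PySem.Chars.neg_one_le_find (s.drop (i+3)) [s[i], s[i], s[i]]
              omega
            obtain ⟨hocc, hmin⟩ := PySem.Chars.find_spec hF0
            set m := (PySem.Chars.find (s.drop (i+3)) [s[i], s[i], s[i]]).toNat with hm
            have hFm : PySem.Chars.find (s.drop (i+3)) [s[i], s[i], s[i]] = (m : Int) :=
              (Int.toNat_of_nonneg hF0).symm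
            rw [hFm, if_neg (by omega), dif_neg (by omega)]
            rw [pv_partition_found [s[i], s[i], s[i]] (by simp) (s.drop (i+3)) m hocc hmin]
            simp only []
            rw [show ((i+3 : Nat) : Int) + (m : Int) = ((i+3+m : Nat) : Int) from by
                push_cast; ring,
              Int.toNat_natCast, pv_sliceC, sliceN_add s (i+3) m]
            have hdd : List.drop (m + ([s[i], s[i], s[i]] : List Char).length)
                (List.drop (i+3) s) = s.drop (i+3+m+3) := by
              rw [List.drop_drop]
              congr 1
            rw [hdd, ih (i+3+m+3) _ (by omega)]
            rw [List.append_assoc]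
            congr 1
            simp only [List.cons_append, List.nil_append]
            congr 2
            rw [pv_kw3]
            by_cases hsql : (pvKwA3.any fun kw =>
                PySem.Chars.isIn kw (PySem.Chars.upper ((s.drop (i+3)).take m))) = true
            · rw [if_pos hsql, if_pos ⟨List.cons_ne_nil _ _, hsql⟩]
            · rw [if_neg hsql, if_neg (fun hh => hsql hh.2)]
        · -- a short string starts here
          have h3 : ¬ (PySem.List.slice s (some (i : Int)) (some ((i : Int)+3)) = "\"\"\"".toList ∨
                       PySem.List.slice s (some (i : Int)) (some ((i : Int)+3)) = "'''".toList) := by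
            rw [pv_sliceC3, show sliceN s i (i+3) = (s.drop i).take 3 from sliceN_add s i 3,
              pv_quote3, pv_quote3']
            rintro (h | h) <;> apply ht
            · obtain ⟨h1, h2⟩ := (pv_take3 s i hi '"').1 h
              rw [(pv_take3 s i hi s[i]), h1]
              exact ⟨rfl, h2⟩
            · obtain ⟨h1, h2⟩ := (pv_take3 s i hi '\'').1 h
              rw [(pv_take3 s i hi s[i]), h1]
              exact ⟨rfl, h2⟩
          have hpre : ¬ [s[i], s[i], s[i]].isPrefixOf (s[i] :: s.drop (i+1)) = true := by
            rw [List.isPrefixOf_iff_prefix, List.prefix_iff_eq_take, ← hdrop]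
            intro hh
            exact ht hh.symm
          have hnb : ¬ s[i] = '\\' := by
            rcases hc with hq | hq <;> rw [hq] <;> decide
          conv_lhs => simp only [pvLoopA]
          rw [dif_pos hi, dif_neg h3, if_pos hc]
          rw [hdrop]
          conv_rhs => simp only [pvPeel]
          rw [if_pos hc, if_neg hpre]
          rw [pv_consume s s[i] hnb s.length (i+1) [] (by omega)]
          set j := pvFindJ s s[i] s.length (i+1) with hj
          have hge : i + 1 ≤ j := pvFindJ_ge s s[i] s.length (i+1)
          rw [ih (j+1) _ (by omega)]
          rw [List.append_assoc]
          congr 1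
          simp only [List.cons_append, List.nil_append]
          congr 2
          rw [pv_sliceC1j, pv_kw1]
          by_cases hin : PySem.Chars.isIn "?".toList (sliceN s (i+1) j) = true
          · by_cases hsql : (pvKwA1.any fun kw =>
                PySem.Chars.isIn kw (PySem.Chars.upper (sliceN s (i+1) j))) = true
            · have hA : ((pvKwA1.any fun kw =>
                  PySem.Chars.isIn kw (PySem.Chars.upper (sliceN s (i+1) j))) &&
                  PySem.Chars.isIn "?".toList (sliceN s (i+1) j)) = true := by
                rw [hsql, hin]
                rfl
              rw [if_pos hA, if_pos ⟨hin, hsql⟩]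
            · have hA : ¬ ((pvKwA1.any fun kw =>
                  PySem.Chars.isIn kw (PySem.Chars.upper (sliceN s (i+1) j))) &&
                  PySem.Chars.isIn "?".toList (sliceN s (i+1) j)) = true := by
                simp only [Bool.and_eq_true]
                exact fun hh => hsql hh.1
              rw [if_neg hA, if_neg (fun hh => hsql hh.2)]
          · have hA : ¬ ((pvKwA1.any fun kw =>
                PySem.Chars.isIn kw (PySem.Chars.upper (sliceN s (i+1) j))) &&
                PySem.Chars.isIn "?".toList (sliceN s (i+1) j)) = true := by
              simp only [Bool.and_eq_true]
              exact fun hh => hin hh.2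
            rw [if_neg hA, if_neg (fun hh => hin hh.1)]
        -- end of quote cases
      · -- an ordinary character
        have h3 : ¬ (PySem.List.slice s (some (i : Int)) (some ((i : Int)+3)) = "\"\"\"".toList ∨
                     PySem.List.slice s (some (i : Int)) (some ((i : Int)+3)) = "'''".toList) := by
          rw [pv_sliceC3, show sliceN s i (i+3) = (s.drop i).take 3 from sliceN_add s i 3,
            pv_quote3, pv_quote3']
          rintro (h | h)
          · exact hc (Or.inl ((pv_take3 s i hi '"').1 h).1)
          · exact hc (Or.inr ((pv_take3 s i hi '\'').1 h).1)
        conv_lhs => simp only [pvLoopA]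
        rw [dif_pos hi, dif_neg h3, if_neg hc]
        rw [hdrop]
        conv_rhs => simp only [pvPeel]
        rw [if_neg hc]
        rw [ih (i+1) _ (by omega)]
        simp
    · rw [List.drop_eq_nil_of_le (by omega)]
      rw [pvLoopA_end s (f+1) i acc (by omega)]
      simp [pvPeel]

-- ===== VERDICT (by name: the statement is the Claim_ definition above) =====
theorem replace_sql_placeholders_spec : Claim_equal_replace_sql_placeholders := by
  intro text _
  unfold Spec_replace_sql_placeholders replace_sql_placeholders replace_sql_placeholders_alt
  rw [pv_main text.toList text.toList.length 0 [] (by omega)]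
  rfl
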